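-- pv_equiv track=rewrite | github.com/LuisSoares/CS_Bio | exercise5.py | PositivePatternsWindow
-- ===== SOURCE A (Python) =====
-- def count(seq,pattern):
--     '''Takes a sequence and a pattern and returns number
--     of occurences of pattern in the sequence including overlapping'''
--     count=0
--     for i in range(0,len(seq)-len(pattern)):
--         if seq[i:i+len(pattern)]==pattern:
--             count+=1
--     return count
--
-- def PatternMatch(pattern,seq):
--     '''Takes a pattern and a seq and returns list the indexes
--     where the pattern is found'''
--     positions=[]
--     for i in range(0,len(seq)-len(pattern)):
--         if seq[i:i+len(pattern)]==pattern:
--             positions.append(i)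
--     return positions
--
-- def FrequentWords(Seq,k):
-- 	'''Takes a Sequence and an int(k) finds
--     all k-mers in the sequence and returns dict with Pattern->Freq
-- 	'''
-- 	FrequentPatterns=dict()
-- 	for i in range(0,len(Seq)-k):
-- 		Pattern=Seq[i:i+k]
-- 		FrequentPatterns[Pattern]=count(Seq,Pattern)
-- 	return FrequentPatterns
--
-- def PatternFrequencies(FrequentPatterns,freq):
-- 	'''Take a dict of Pattern->Freq and returns list of patterns with more
-- 	than Freq occurences'''
-- 	a=[key for key,value in FrequentPatterns.items() if value>=freq]
-- 	return a
--
-- def PositivePatterns(seq,k,freq):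
-- 	'''Finds sequences of k size in seq that are repeated at least
-- 	freq times, returns dict of Pattern->positions in seq
-- 	'''
-- 	FrequentPatterns=FrequentWords(seq,k)
-- 	PositivePatterns=PatternFrequencies(FrequentPatterns,freq)
-- 	PositivePatternsPositions=dict()
-- 	for item in PositivePatterns:
-- 		PositivePatternsPositions[item]=PatternMatch(item,seq)
-- 	return PositivePatternsPositions
--
-- def PositivePatternsWindow(seq,freq,window,k):
-- 	'''Finds sequences of k size in seq that are repeated at least
-- 	freq times, returns patterns that are repeated at least freq times
-- 	in window
-- 	'''
-- 	PositivePatternsPositions=PositivePatterns(seq,k,freq)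
-- 	Positives=set()
-- 	for item,value in PositivePatternsPositions.items():
-- 		i=0
-- 		while True:
-- 			try:
-- 				if value[i+(freq-1)]-value[i]<=window:
-- 					Positives.add(item)
-- 					break
-- 				i=i+1
-- 			except:break
-- 	return Positives
-- ===== SOURCE B (Python) =====
-- def PositivePatternsWindow(seq, freq, window, k):
--     '''Single pass: group the k-mer start positions with one dict, then keep
--     the k-mers whose positions contain freq consecutive occurrences spanning
--     at most window.'''
--     pos = {}
--     for i in range(len(seq) - k):
--         pos.setdefault(seq[i:i+k], []).append(i)
--     return {pat for pat, p in pos.items()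
--             if any(b - a <= window for a, b in zip(p, p[freq - 1:]))}
-- ===== Notes on version B (the rewrite author's own statement) =====
-- stated objective: faster
-- what changed: Instead of recounting and re-scanning the whole sequence for every k-mer (count + PatternMatch per position), B builds one dict k-mer -> list of start positions in a single pass and then checks each position list once with a zip of the list against itself shifted by freq-1.
-- outside the precondition, e.g. on PositivePatternsWindow('aaaa', 0, -1, 1): A returns {'a'}, B returns set(); on PositivePatternsWindow('', 1, 1, -3): A returns set(), B returns {''}
import Mathlib
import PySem

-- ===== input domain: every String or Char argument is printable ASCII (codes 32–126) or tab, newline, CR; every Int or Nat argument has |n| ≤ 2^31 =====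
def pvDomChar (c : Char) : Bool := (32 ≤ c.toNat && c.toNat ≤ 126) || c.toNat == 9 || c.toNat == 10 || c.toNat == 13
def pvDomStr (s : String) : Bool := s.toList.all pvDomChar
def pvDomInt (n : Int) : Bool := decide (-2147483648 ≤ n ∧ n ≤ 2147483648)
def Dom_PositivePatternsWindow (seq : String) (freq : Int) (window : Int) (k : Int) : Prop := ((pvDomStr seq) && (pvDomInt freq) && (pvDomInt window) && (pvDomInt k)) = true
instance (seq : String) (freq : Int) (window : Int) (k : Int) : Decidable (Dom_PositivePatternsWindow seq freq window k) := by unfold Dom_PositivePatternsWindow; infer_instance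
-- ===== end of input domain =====

-- B replaces A's per-pattern rescans (count + PatternMatch for every position) by one
-- grouping pass kmer -> positions plus a shifted-zip window check; same return value on Pre_.


-- ===== PORT A =====
-- count(seq, pattern)
def pvrCount (seq pattern : String) : Int :=
  (PySem.List.pyRange 0 (PySem.Str.len seq - PySem.Str.len pattern) 1).foldl
    (fun c i =>
      if PySem.Str.slice seq (some i) (some (i + PySem.Str.len pattern)) = pattern then c + 1 else c) 0

-- PatternMatch(pattern, seq)
def pvrPatternMatch (pattern seq : String) : List Int :=
  (PySem.List.pyRange 0 (PySem.Str.len seq - PySem.Str.len pattern) 1).foldl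
    (fun positions i =>
      if PySem.Str.slice seq (some i) (some (i + PySem.Str.len pattern)) = pattern then positions ++ [i] else positions) []

-- FrequentWords(Seq, k)
def pvrFrequentWords (Seq : String) (k : Int) : PySem.Dict String Int :=
  (PySem.List.pyRange 0 (PySem.Str.len Seq - k) 1).foldl
    (fun d i =>
      d.insert (PySem.Str.slice Seq (some i) (some (i + k)))
        (pvrCount Seq (PySem.Str.slice Seq (some i) (some (i + k)))))
    PySem.Dict.empty

-- PatternFrequencies(FrequentPatterns, freq)
def pvrPatternFrequencies (FrequentPatterns : PySem.Dict String Int) (freq : Int) : List String :=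
  (FrequentPatterns.items.filter (fun kv => decide (freq ≤ kv.2))).map (fun kv => kv.1)

-- PositivePatterns(seq, k, freq)
def pvrPositivePatterns (seq : String) (k freq : Int) : PySem.Dict String (List Int) :=
  (pvrPatternFrequencies (pvrFrequentWords seq k) freq).foldl
    (fun d item => d.insert item (pvrPatternMatch item seq)) PySem.Dict.empty

-- the 'while True: try/except' loop of A; the none branches are exactly the except: break
def pvrWhile (value : List Int) (freq window : Int) (i : Nat) : Bool :=
  match PySem.List.pyGet? value ((i : Int) + (freq - 1)) with
  | none => false
  | some a =>
    match h : PySem.List.pyGet? value ((i : Int)) with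
    | none => false
    | some b => if a - b ≤ window then true else pvrWhile value freq window (i + 1)
termination_by value.length - i
decreasing_by
  rw [PySem.List.pyGet?_natCast] at h
  have hi : i < value.length := (List.getElem?_eq_some_iff.mp h).1
  omega

def PositivePatternsWindow (seq : String) (freq : Int) (window : Int) (k : Int) : List String :=
  ((pvrPositivePatterns seq k freq).items).foldl
    (fun Positives it => if pvrWhile it.2 freq window 0 then PySem.Set.add Positives it.1 else Positives)
    PySem.Set.empty

-- ===== PORT B =====
-- one grouping pass: pos.setdefault(seq[i:i+k], []).append(i)
def pvrAltPositions (seq : String) (k : Int) : PySem.Dict String (List Int) :=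
  (PySem.List.pyRange 0 (PySem.Str.len seq - k) 1).foldl
    (fun pos i => pos.modify (PySem.Str.slice seq (some i) (some (i + k))) [] (fun l => l ++ [i]))
    PySem.Dict.empty

-- any(b - a <= window for a, b in zip(p, p[freq-1:]))
def pvrAltCheck (p : List Int) (freq window : Int) : Bool :=
  (p.zip (PySem.List.slice p (some (freq - 1)) none)).any (fun ab => ab.2 - ab.1 ≤ window)

def PositivePatternsWindow_alt (seq : String) (freq : Int) (window : Int) (k : Int) : List String :=
  PySem.Set.ofList
    (((pvrAltPositions seq k).items.filter (fun pv => pvrAltCheck pv.2 freq window)).map (fun pv => pv.1))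

-- ===== PRECONDITION & SPEC =====
-- Pre_ excludes k < 0, where A slices each pattern with a negative end bound but counts it
-- over a different range, and freq ≤ 0 on sequences that actually contain k-mers (len(seq) > k),
-- where A's window test indexes the position list at the negative offset freq-1 and its result
-- is an accident of Python's negative-index wraparound — both outside the natural domain of a
-- repeat count ≥ 1 and a k-mer length ≥ 0 (when len(seq) ≤ k there is no k-mer and any freq is harmless).
def Pre_PositivePatternsWindow (seq : String) (freq : Int) (window : Int) (k : Int) : Prop :=
  0 ≤ k ∧ (1 ≤ freq ∨ PySem.Str.len seq ≤ k)
instance (seq : String) (freq : Int) (window : Int) (k : Int) : Decidable (Pre_PositivePatternsWindow seq freq window k) := by unfold Pre_PositivePatternsWindow; infer_instance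

def pvWitness_PositivePatternsWindow : String × Int × Int × Int := ("acgtacgt", 2, 4, 3)

def Spec_PositivePatternsWindow (seq : String) (freq : Int) (window : Int) (k : Int) (out : List String) : Prop := out = PositivePatternsWindow_alt seq freq window k
instance (seq : String) (freq : Int) (window : Int) (k : Int) (out : List String) : Decidable (Spec_PositivePatternsWindow seq freq window k out) := by unfold Spec_PositivePatternsWindow; infer_instance

-- ===== CLAIM (what is proved, stated in full; the proofs are below) =====
def Claim_equal_PositivePatternsWindow : Prop := ∀ (seq : String) (freq : Int) (window : Int) (k : Int), Dom_PositivePatternsWindow seq freq window k → Pre_PositivePatternsWindow seq freq window k → Spec_PositivePatternsWindow seq freq window k (PositivePatternsWindow seq freq window k)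

-- ===== LEMMAS AND PROOFS =====
-- helper characterisations used only by the proofs
def pvrKm (seq : String) (k i : Int) : String := PySem.Str.slice seq (some i) (some (i + k))
def pvrR (seq : String) (k : Int) : List Int := PySem.List.pyRange 0 (PySem.Str.len seq - k) 1
def pvrOcc (seq : String) (k : Int) (P : String) : List Int := (pvrR seq k).filter (fun i => pvrKm seq k i == P)
def pvrK (seq : String) (k : Int) : List String := PySem.Set.ofList ((pvrR seq k).map (pvrKm seq k))

lemma pvr_while_eq_any (p : List Int) (freq window : Int) (hf : 1 ≤ freq) (i : Nat) :
    pvrWhile p freq window i =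
      ((p.drop i).zip (p.drop (i + (freq - 1).toNat))).any (fun ab => ab.2 - ab.1 ≤ window) := by
  set f := (freq - 1).toNat with hfdef
  have hcast : (i : Int) + (freq - 1) = ((i + f : Nat) : Int) := by
    push_cast [hfdef]; omega
  induction hd : p.length - i using Nat.strong_induction_on generalizing i with
  | _ d ih =>
    rw [pvrWhile, hcast, PySem.List.pyGet?_natCast, PySem.List.pyGet?_natCast]
    by_cases hif : i + f < p.length
    · have hi : i < p.length := by omega
      rw [List.getElem?_eq_getElem hif, List.getElem?_eq_getElem hi]
      have hdrop1 : p.drop i = p[i] :: p.drop (i+1) := List.drop_eq_getElem_cons hi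
      have hdrop2 : p.drop (i + f) = p[i+f] :: p.drop (i+f+1) := List.drop_eq_getElem_cons hif
      rw [hdrop1, hdrop2]
      simp only [List.zip_cons_cons, List.any_cons]
      by_cases hc : p[i+f] - p[i] ≤ window
      · simp [hc]
      · simp only [if_neg hc]
        have := ih (p.length - (i+1)) (by omega) (i+1) (by push_cast [hfdef]; omega) rfl
        rw [this]
        have : i + 1 + f = i + f + 1 := by omega
        rw [this]
        simp [hc]
    · rw [List.getElem?_eq_none (by omega)]
      have : p.drop (i + f) = [] := List.drop_eq_nil_of_le (by omega)
      simp [this]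

lemma pvr_check_eq (p : List Int) (freq window : Int) (hf : 1 ≤ freq) :
    (decide (freq ≤ (p.length : Int)) && pvrWhile p freq window 0) = pvrAltCheck p freq window := by
  have hslice : PySem.List.slice p (some (freq - 1)) none = p.drop (freq - 1).toNat :=
    PySem.List.slice_from p (by omega)
  rw [pvrAltCheck, hslice]
  rw [pvr_while_eq_any p freq window hf 0]
  simp only [List.drop_zero, Nat.zero_add]
  by_cases hle : freq ≤ (p.length : Int)
  · simp [hle]
  · have : p.length ≤ (freq - 1).toNat := by omega
    rw [List.drop_eq_nil_of_le this]
    simp [hle]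

lemma pvr_foldl_set_add_if {α : Type} [BEq α] [LawfulBEq α] (q : α → Bool) :
    ∀ (l : List α) (s0 : List α), l.Nodup → (∀ x ∈ l, x ∉ s0) →
      l.foldl (fun s x => if q x then PySem.Set.add s x else s) s0 = s0 ++ l.filter q
  | [], s0, _, _ => by simp
  | x :: t, s0, hnd, hs => by
    simp only [List.foldl_cons, List.filter_cons]
    have hx : x ∉ s0 := hs x (List.mem_cons_self ..)
    have hadd : PySem.Set.add s0 x = s0 ++ [x] := by
      simp only [PySem.Set.add]
      simp [hx]
    by_cases hq : q x
    · rw [if_pos hq, if_pos hq, hadd,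
        pvr_foldl_set_add_if q t (s0 ++ [x]) (List.Nodup.of_cons hnd)
          (by intro y hy
              simp only [List.mem_append, List.mem_singleton]
              rintro (h | h)
              · exact hs y (List.mem_cons_of_mem _ hy) h
              · exact (List.nodup_cons.mp hnd).1 (h ▸ hy))]
      simp
    · rw [if_neg hq, if_neg hq,
        pvr_foldl_set_add_if q t s0 (List.Nodup.of_cons hnd)
          (fun y hy => hs y (List.mem_cons_of_mem _ hy))]

lemma pvr_get?_foldl_insert_keyed (km : Int → String) (v : String → Int) :
    ∀ (l : List Int) (d : PySem.Dict String Int) (P : String),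
      (l.foldl (fun d i => d.insert (km i) (v (km i))) d).get? P =
        if P ∈ l.map km then some (v P) else d.get? P
  | [], d, P => by simp
  | i :: t, d, P => by
    simp only [List.foldl_cons, List.map_cons, List.mem_cons]
    rw [pvr_get?_foldl_insert_keyed km v t _ P]
    by_cases ht : P ∈ t.map km
    · simp [ht]
    · rw [if_neg ht, PySem.Dict.get?_insert]
      by_cases he : P = km i
      · simp [he]
      · simp [he, ht]

lemma pvr_len_km (seq : String) (k i : Int) (hk : 0 ≤ k) (hi : 0 ≤ i)
    (hik : i + k ≤ PySem.Str.len seq) : PySem.Str.len (pvrKm seq k i) = k := by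
  rw [PySem.Str.len_eq] at hik ⊢
  rw [pvrKm]
  rw [show (PySem.Str.slice seq (some i) (some (i + k))).toList.length
        = (PySem.Chars.slice seq.toList (some i) (some (i + k))).length by
      rw [PySem.Str.toList_slice]]
  rw [PySem.Chars.slice_eq_listSlice]
  rw [PySem.List.slice_of_nonneg seq.toList hi (by omega) (by omega) (by omega)]
  simp only [List.length_take, List.length_drop]
  omega

lemma pvr_decide_beq (a b : String) : decide (a = b) = (a == b) := by
  by_cases h : a = b <;> simp [h]

lemma pvr_alt_eq_foldl (seq : String) (k : Int) :
    pvrAltPositions seq k =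
      (pvrR seq k).foldl
        (fun d i => d.modify (pvrKm seq k i) []
          ((fun (_ : PySem.Dict String (List Int)) (i : Int) (l : List Int) => l ++ [i]) d i))
        PySem.Dict.empty := rfl

lemma pvr_alt_keys (seq : String) (k : Int) : (pvrAltPositions seq k).keys = pvrK seq k := by
  rw [pvr_alt_eq_foldl,
    PySem.Dict.keys_foldl_modify_key (pvrR seq k) (fun i => pvrKm seq k i) []
      (fun _ i l => l ++ [i]) PySem.Dict.empty,
    PySem.Dict.keys_empty, PySem.Set.update_nil_left, pvrK]

lemma pvr_alt_keys_nodup (seq : String) (k : Int) : (pvrAltPositions seq k).keys.Nodup := by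
  rw [pvr_alt_eq_foldl]
  exact PySem.Dict.nodup_keys_foldl_modify_key _ _ _ _ _ PySem.Dict.nodup_keys_empty

lemma pvr_alt_getD (seq : String) (k : Int) (P : String) :
    (pvrAltPositions seq k).getD P [] = pvrOcc seq k P := by
  have h1 : pvrAltPositions seq k =
      ((pvrR seq k).map (fun i => (pvrKm seq k i, i))).foldl
        (fun d p => d.modify p.1 [] (fun l => l ++ [p.2])) PySem.Dict.empty := by
    rw [List.foldl_map]; rfl
  rw [h1, PySem.Dict.getD_foldl_modify_append, PySem.Dict.getD_empty]
  rw [List.filter_map, List.map_map]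
  show List.map (fun i : Int => i) ((pvrR seq k).filter (fun i => pvrKm seq k i == P)) = _
  rw [List.map_id', pvrOcc]

lemma pvr_fw_eq_foldl (seq : String) (k : Int) :
    pvrFrequentWords seq k =
      (pvrR seq k).foldl
        (fun d i => d.insert (pvrKm seq k i)
          ((fun (_ : PySem.Dict String Int) (i : Int) => pvrCount seq (pvrKm seq k i)) d i))
        PySem.Dict.empty := rfl

lemma pvr_fw_keys (seq : String) (k : Int) : (pvrFrequentWords seq k).keys = pvrK seq k := by
  rw [pvr_fw_eq_foldl,
    PySem.Dict.keys_foldl_insert_key (pvrR seq k) (fun i => pvrKm seq k i) _ PySem.Dict.empty,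
    PySem.Dict.keys_empty, PySem.Set.update_nil_left, pvrK]

lemma pvr_fw_keys_nodup (seq : String) (k : Int) : (pvrFrequentWords seq k).keys.Nodup := by
  rw [pvr_fw_eq_foldl]
  exact PySem.Dict.nodup_keys_foldl_insert_key _ _ _ _ PySem.Dict.nodup_keys_empty

lemma pvr_fw_get? (seq : String) (k : Int) (P : String) (hP : P ∈ pvrK seq k) :
    (pvrFrequentWords seq k).get? P = some (pvrCount seq P) := by
  have h0 : pvrFrequentWords seq k =
      (pvrR seq k).foldl (fun d i => d.insert (pvrKm seq k i) (pvrCount seq (pvrKm seq k i)))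
        PySem.Dict.empty := rfl
  rw [h0, pvr_get?_foldl_insert_keyed (pvrKm seq k) (pvrCount seq)]
  rw [if_pos]
  exact (PySem.Set.mem_ofList _ _).mp hP

lemma pvr_fw_items (seq : String) (k : Int) :
    (pvrFrequentWords seq k).items = (pvrK seq k).map (fun P => (P, pvrCount seq P)) := by
  rw [PySem.Dict.items_eq_map_keys _ (pvr_fw_keys_nodup seq k) 0, pvr_fw_keys]
  refine List.map_congr_left (fun P hP => ?_)
  rw [PySem.Dict.getD_of_get?_eq_some _ _ (pvr_fw_get? seq k P hP)]

lemma pvr_pf_eq (seq : String) (k freq : Int) :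
    pvrPatternFrequencies (pvrFrequentWords seq k) freq =
      (pvrK seq k).filter (fun P => decide (freq ≤ pvrCount seq P)) := by
  rw [pvrPatternFrequencies, pvr_fw_items, List.filter_map, List.map_map]
  show List.map (fun P => P)
      ((pvrK seq k).filter (fun P => decide (freq ≤ pvrCount seq P))) = _
  rw [List.map_id']

lemma pvr_pp_items (seq : String) (k freq : Int) :
    (pvrPositivePatterns seq k freq).items =
      ((pvrK seq k).filter (fun P => decide (freq ≤ pvrCount seq P))).map
        (fun P => (P, pvrPatternMatch P seq)) := by
  rw [pvrPositivePatterns, pvr_pf_eq]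
  have hnd : ((pvrK seq k).filter (fun P => decide (freq ≤ pvrCount seq P))).Nodup :=
    (PySem.Set.nodup_ofList _).filter _
  have h := PySem.Dict.items_foldl_insert_fresh
      ((pvrK seq k).filter (fun P => decide (freq ≤ pvrCount seq P)))
      (fun a => a) (fun a => pvrPatternMatch a seq) PySem.Dict.empty
      (fun a _ => PySem.Dict.contains_empty a)
      (by simpa using hnd)
  exact h

lemma pvr_a_eq (seq : String) (freq window k : Int) :
    PositivePatternsWindow seq freq window k =
      ((pvrK seq k).filter (fun P => decide (freq ≤ pvrCount seq P))).filter
        (fun P => pvrWhile (pvrPatternMatch P seq) freq window 0) := by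
  rw [PositivePatternsWindow, pvr_pp_items, List.foldl_map]
  have hnd : ((pvrK seq k).filter (fun P => decide (freq ≤ pvrCount seq P))).Nodup :=
    (PySem.Set.nodup_ofList _).filter _
  have h := pvr_foldl_set_add_if (fun P => pvrWhile (pvrPatternMatch P seq) freq window 0)
      ((pvrK seq k).filter (fun P => decide (freq ≤ pvrCount seq P))) [] hnd (by simp)
  exact h

lemma pvr_b_eq (seq : String) (freq window k : Int) :
    PositivePatternsWindow_alt seq freq window k =
      (pvrK seq k).filter (fun P => pvrAltCheck (pvrOcc seq k P) freq window) := by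
  have hitems : (pvrAltPositions seq k).items = (pvrK seq k).map (fun P => (P, pvrOcc seq k P)) := by
    rw [PySem.Dict.items_eq_map_keys _ (pvr_alt_keys_nodup seq k) [], pvr_alt_keys]
    exact List.map_congr_left (fun P _ => by rw [pvr_alt_getD])
  rw [PositivePatternsWindow_alt, hitems, List.filter_map, List.map_map]
  show PySem.Set.ofList (List.map (fun P => P)
      ((pvrK seq k).filter (fun P => pvrAltCheck (pvrOcc seq k P) freq window))) = _
  rw [List.map_id']
  exact PySem.Set.ofList_eq_self_of_nodup _ ((PySem.Set.nodup_ofList _).filter _)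

lemma pvr_pm_eq_occ (seq : String) (k : Int) (P : String) (hlen : PySem.Str.len P = k) :
    pvrPatternMatch P seq = pvrOcc seq k P := by
  rw [pvrPatternMatch, hlen]
  have h := PySem.List.foldl_append_if
      (fun i => decide (PySem.Str.slice seq (some i) (some (i + k)) = P)) (fun i : Int => i)
      (pvrR seq k) []
  simp only [decide_eq_true_eq] at h
  rw [pvrOcc]
  refine (h.trans ?_)
  rw [List.map_id', List.nil_append]
  refine List.filter_congr (fun i _ => ?_)
  exact pvr_decide_beq _ _

lemma pvr_count_eq (seq : String) (k : Int) (P : String) (hlen : PySem.Str.len P = k) :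
    pvrCount seq P = ((pvrOcc seq k P).length : Int) := by
  rw [pvrCount, hlen]
  have h := PySem.List.foldl_count_if
      (fun i => decide (PySem.Str.slice seq (some i) (some (i + k)) = P)) (pvrR seq k) 0
  simp only [decide_eq_true_eq] at h
  refine (h.trans ?_)
  have hfe : List.filter (fun i => decide (PySem.Str.slice seq (some i) (some (i + k)) = P))
      (pvrR seq k) = pvrOcc seq k P := by
    rw [pvrOcc]; exact List.filter_congr (fun i _ => pvr_decide_beq _ _)
  rw [List.countP_eq_length_filter, hfe, zero_add]

lemma pvr_main (seq : String) (freq window k : Int) (hf : 1 ≤ freq) (hk : 0 ≤ k) :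
    PositivePatternsWindow seq freq window k = PositivePatternsWindow_alt seq freq window k := by
  rw [pvr_a_eq, pvr_b_eq, List.filter_filter]
  refine List.filter_congr (fun P hP => ?_)
  have hlen : PySem.Str.len P = k := by
    rcases List.mem_map.mp ((PySem.Set.mem_ofList _ _).mp hP) with ⟨i, hiR, rfl⟩
    rcases PySem.List.mem_pyRange_one.mp hiR with ⟨h0, h1⟩
    exact pvr_len_km seq k i hk h0 (by omega)
  rw [pvr_pm_eq_occ seq k P hlen, pvr_count_eq seq k P hlen, Bool.and_comm]
  exact pvr_check_eq (pvrOcc seq k P) freq window hf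

lemma pvr_trivial (seq : String) (freq window k : Int) (hn : PySem.Str.len seq ≤ k) :
    PositivePatternsWindow seq freq window k = PositivePatternsWindow_alt seq freq window k := by
  have hR : pvrR seq k = [] := by
    rw [pvrR]; exact PySem.List.pyRange_one_eq_nil (by omega)
  have hK : pvrK seq k = [] := by rw [pvrK, hR]; rfl
  rw [pvr_a_eq, pvr_b_eq, hK]
  rfl

-- ===== VERDICT (by name: the statement is the Claim_ definition above) =====
theorem PositivePatternsWindow_spec : Claim_equal_PositivePatternsWindow := by
  intro seq freq window k _ hpre
  rcases hpre with ⟨hk, hf | hn⟩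
  · exact pvr_main seq freq window k hf hk
  · exact pvr_trivial seq freq window k hn
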